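-- pv_equiv track=rewrite | github.com/sisamiwe/shng-nspanel-plugin | __init__.py | getWeatherCondition
-- ===== SOURCE A (Python) =====
-- def getWeatherCondition(weatherid, day: bool = True):
--     """Get weather condition from weather data."""
--     condition_classes = {
--         'cloudy': [803, 804],
--         'fog': [701, 721, 741],
--         'hail': [906],
--         'lightning': [210, 211, 212, 221],
--         'lightning_rainy': [200, 201, 202, 230, 231, 232],
--         'partlycloudy': [801, 802],
--         'pouring': [504, 314, 502, 503, 522],
--         'rainy': [300, 301, 302, 310, 311, 312, 313, 500, 501, 520, 521],
--         'snowy': [600, 601, 602, 611, 612, 620, 621, 622],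
--         'snowy_rainy': [511, 615, 616],
--         'windy': [905, 951, 952, 953, 954, 955, 956, 957],
--         'windy_variant': [958, 959, 960, 961],
--         'exceptional': [711, 731, 751, 761, 762, 771, 900, 901, 962, 903, 904],
--     }
--     if weatherid == 800:  # same code for day and night
--         if day:
--             return ['sunny']
--         else:
--             return ['clear_night']
--     else:
--         return [k for k, v in condition_classes.items() if weatherid in v]
-- ===== SOURCE B (Python) =====
-- _CONDITION_BY_ID = {
--     803: 'cloudy', 804: 'cloudy',
--     701: 'fog', 721: 'fog', 741: 'fog',
--     906: 'hail',
--     210: 'lightning', 211: 'lightning', 212: 'lightning', 221: 'lightning',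
--     200: 'lightning_rainy', 201: 'lightning_rainy', 202: 'lightning_rainy',
--     230: 'lightning_rainy', 231: 'lightning_rainy', 232: 'lightning_rainy',
--     801: 'partlycloudy', 802: 'partlycloudy',
--     504: 'pouring', 314: 'pouring', 502: 'pouring', 503: 'pouring', 522: 'pouring',
--     300: 'rainy', 301: 'rainy', 302: 'rainy', 310: 'rainy', 311: 'rainy',
--     312: 'rainy', 313: 'rainy', 500: 'rainy', 501: 'rainy', 520: 'rainy', 521: 'rainy',
--     600: 'snowy', 601: 'snowy', 602: 'snowy', 611: 'snowy', 612: 'snowy',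
--     620: 'snowy', 621: 'snowy', 622: 'snowy',
--     511: 'snowy_rainy', 615: 'snowy_rainy', 616: 'snowy_rainy',
--     905: 'windy', 951: 'windy', 952: 'windy', 953: 'windy', 954: 'windy',
--     955: 'windy', 956: 'windy', 957: 'windy',
--     958: 'windy_variant', 959: 'windy_variant', 960: 'windy_variant', 961: 'windy_variant',
--     711: 'exceptional', 731: 'exceptional', 751: 'exceptional', 761: 'exceptional',
--     762: 'exceptional', 771: 'exceptional', 900: 'exceptional', 901: 'exceptional',
--     962: 'exceptional', 903: 'exceptional', 904: 'exceptional',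
-- }
--
--
-- def getWeatherCondition(weatherid, day: bool = True):
--     """Get weather condition from weather data."""
--     if weatherid == 800:  # same code for day and night
--         return ['sunny'] if day else ['clear_night']
--     name = _CONDITION_BY_ID.get(weatherid)
--     return [] if name is None else [name]
-- ===== Notes on version B (the rewrite author's own statement) =====
-- stated objective: simpler
-- what changed: Replaces the per-call dict of condition-name -> id-list scanned by a comprehension with a module-level inverted id -> name dict and a single .get lookup.
import Mathlib
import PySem

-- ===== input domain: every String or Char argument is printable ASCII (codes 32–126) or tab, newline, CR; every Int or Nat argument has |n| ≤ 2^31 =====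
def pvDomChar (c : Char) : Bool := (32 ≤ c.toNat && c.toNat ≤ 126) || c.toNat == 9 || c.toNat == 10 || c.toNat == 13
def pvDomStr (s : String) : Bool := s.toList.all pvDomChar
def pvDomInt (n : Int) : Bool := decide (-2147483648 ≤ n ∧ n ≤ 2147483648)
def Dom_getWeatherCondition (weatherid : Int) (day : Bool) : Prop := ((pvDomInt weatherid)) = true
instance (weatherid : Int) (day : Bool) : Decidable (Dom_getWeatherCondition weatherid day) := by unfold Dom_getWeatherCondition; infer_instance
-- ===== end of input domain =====

-- B replaces A's per-call scan of a name -> id-list dict with a single lookup in an inverted id -> name dict (simpler).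

-- ===== PORT A =====
-- condition_classes, a dict literal iterated in insertion order via .items()
def conditionClasses : List (String × List Int) :=
  [ ("cloudy", [803, 804]),
    ("fog", [701, 721, 741]),
    ("hail", [906]),
    ("lightning", [210, 211, 212, 221]),
    ("lightning_rainy", [200, 201, 202, 230, 231, 232]),
    ("partlycloudy", [801, 802]),
    ("pouring", [504, 314, 502, 503, 522]),
    ("rainy", [300, 301, 302, 310, 311, 312, 313, 500, 501, 520, 521]),
    ("snowy", [600, 601, 602, 611, 612, 620, 621, 622]),
    ("snowy_rainy", [511, 615, 616]),
    ("windy", [905, 951, 952, 953, 954, 955, 956, 957]),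
    ("windy_variant", [958, 959, 960, 961]),
    ("exceptional", [711, 731, 751, 761, 762, 771, 900, 901, 962, 903, 904]) ]

def getWeatherCondition (weatherid : Int) (day : Bool) : List String :=
  if weatherid == 800 then
    if day then ["sunny"] else ["clear_night"]
  else
    -- [k for k, v in condition_classes.items() if weatherid in v]
    conditionClasses.filterMap (fun kv => if weatherid ∈ kv.2 then some kv.1 else none)

-- ===== PORT B =====
-- _CONDITION_BY_ID, the inverted flat dict
def conditionById : PySem.Dict Int String := PySem.Dict.ofList
  [ (803, "cloudy"), (804, "cloudy"),
    (701, "fog"), (721, "fog"), (741, "fog"),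
    (906, "hail"),
    (210, "lightning"), (211, "lightning"), (212, "lightning"), (221, "lightning"),
    (200, "lightning_rainy"), (201, "lightning_rainy"), (202, "lightning_rainy"),
    (230, "lightning_rainy"), (231, "lightning_rainy"), (232, "lightning_rainy"),
    (801, "partlycloudy"), (802, "partlycloudy"),
    (504, "pouring"), (314, "pouring"), (502, "pouring"), (503, "pouring"), (522, "pouring"),
    (300, "rainy"), (301, "rainy"), (302, "rainy"), (310, "rainy"), (311, "rainy"),
    (312, "rainy"), (313, "rainy"), (500, "rainy"), (501, "rainy"), (520, "rainy"), (521, "rainy"),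
    (600, "snowy"), (601, "snowy"), (602, "snowy"), (611, "snowy"), (612, "snowy"),
    (620, "snowy"), (621, "snowy"), (622, "snowy"),
    (511, "snowy_rainy"), (615, "snowy_rainy"), (616, "snowy_rainy"),
    (905, "windy"), (951, "windy"), (952, "windy"), (953, "windy"), (954, "windy"),
    (955, "windy"), (956, "windy"), (957, "windy"),
    (958, "windy_variant"), (959, "windy_variant"), (960, "windy_variant"), (961, "windy_variant"),
    (711, "exceptional"), (731, "exceptional"), (751, "exceptional"), (761, "exceptional"),
    (762, "exceptional"), (771, "exceptional"), (900, "exceptional"), (901, "exceptional"),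
    (962, "exceptional"), (903, "exceptional"), (904, "exceptional") ]

def getWeatherCondition_alt (weatherid : Int) (day : Bool) : List String :=
  if weatherid == 800 then
    if day then ["sunny"] else ["clear_night"]
  else
    match PySem.Dict.get? conditionById weatherid with
    | none => []
    | some name => [name]

-- ===== PRECONDITION & SPEC =====
def Spec_getWeatherCondition (weatherid : Int) (day : Bool) (out : List String) : Prop := out = getWeatherCondition_alt weatherid day
instance (weatherid : Int) (day : Bool) (out : List String) : Decidable (Spec_getWeatherCondition weatherid day out) := by unfold Spec_getWeatherCondition; infer_instance

-- ===== CLAIM (what is proved, stated in full; the proofs are below) =====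
def Claim_equal_getWeatherCondition : Prop := ∀ (weatherid : Int) (day : Bool), Dom_getWeatherCondition weatherid day → Spec_getWeatherCondition weatherid day (getWeatherCondition weatherid day)

-- ===== LEMMAS AND PROOFS =====
-- every weather id occurring in either table (plus the special-cased 800)
def allWeatherIds : List Int :=
  [800, 803, 804, 701, 721, 741, 906, 210, 211, 212, 221, 200, 201, 202, 230, 231, 232,
   801, 802, 504, 314, 502, 503, 522, 300, 301, 302, 310, 311, 312, 313, 500, 501, 520, 521,
   600, 601, 602, 611, 612, 620, 621, 622, 511, 615, 616, 905, 951, 952, 953, 954, 955, 956, 957,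
   958, 959, 960, 961, 711, 731, 751, 761, 762, 771, 900, 901, 962, 903, 904]

lemma outside_ids_eq (weatherid : Int) (day : Bool)
    (h : weatherid ∉ allWeatherIds) :
    getWeatherCondition weatherid day = getWeatherCondition_alt weatherid day := by
  simp only [allWeatherIds, List.mem_cons, List.not_mem_nil, or_false, not_or] at h
  obtain ⟨h800, hrest⟩ := h
  have hb : PySem.Dict.get? conditionById weatherid = none := by
    rw [PySem.Dict.get?_eq_none_iff_not_mem_keys]
    have hk : (PySem.Dict.keys conditionById) = [803, 804, 701, 721, 741, 906, 210, 211, 212, 221, 200, 201, 202, 230, 231, 232, 801, 802, 504, 314, 502, 503, 522, 300, 301, 302, 310, 311, 312, 313, 500, 501, 520, 521, 600, 601, 602, 611, 612, 620, 621, 622, 511, 615, 616, 905, 951, 952, 953, 954, 955, 956, 957, 958, 959, 960, 961, 711, 731, 751, 761, 762, 771, 900, 901, 962, 903, 904] := by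
      set_option maxRecDepth 4096 in decide
    rw [hk]
    simp only [List.mem_cons, List.not_mem_nil, or_false, not_or]
    omega
  simp only [getWeatherCondition, getWeatherCondition_alt, beq_iff_eq, if_neg h800, hb]
  rw [List.filterMap_eq_nil_iff]
  intro kv hkv
  fin_cases hkv <;>
    (simp only [List.mem_cons, List.not_mem_nil, or_false,
      ite_eq_right_iff, reduceCtorEq, imp_false, not_or]
     omega)

-- ===== VERDICT (by name: the statement is the Claim_ definition above) =====
theorem getWeatherCondition_spec : Claim_equal_getWeatherCondition := by
  unfold Claim_equal_getWeatherCondition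
  intro weatherid day _
  unfold Spec_getWeatherCondition
  by_cases h : weatherid ∈ allWeatherIds
  · fin_cases h <;> cases day <;>
      set_option maxRecDepth 4096 in decide
  · exact outside_ids_eq weatherid day h
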